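-- pv_equiv track=rewrite | github.com/vlad-marlo/algorithms | school/webium/individuals/19/27_7878.py | get_maxes
-- ===== SOURCE A (Python) =====
-- MAGIC_CONST = 157
--
-- def get_maxes(data: list[int], reverse=False) -> list[list[int]]:
--     if reverse:
--         data = data[::-1]
--     maxes = [10**10 for _ in range(MAGIC_CONST)]
--     maxes[data[0] % MAGIC_CONST] = data[0]
--     res = [maxes]
--     for i in data[1:]:
--         new = res[-1].copy()
--         new[i % MAGIC_CONST] = min(new[i % MAGIC_CONST], i)
--         res.append(new)
--     return res if not reverse else res[::-1]
-- ===== SOURCE B (Python) =====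
-- MAGIC_CONST = 157
--
-- def get_maxes(data: list[int], reverse=False) -> list[list[int]]:
--     seq = data[::-1] if reverse else data
--     # column-major: one running-minimum column per residue class, then transpose
--     cols = []
--     for b in range(MAGIC_CONST):
--         cur = 10 ** 10
--         col = []
--         for x in seq:
--             if x % MAGIC_CONST == b:
--                 cur = min(cur, x)
--             col.append(cur)
--         cols.append(col)
--     rows = [list(r) for r in zip(*cols)]
--     return rows[::-1] if reverse else rows
-- ===== Notes on version B (the rewrite author's own statement) =====
-- stated objective: alternative
-- what changed: Row-major snapshot loop (copy previous 157-row, lower one bucket, append) is replaced by a column-major algorithm: 157 independent running-minimum columns, one per residue class, computed in staged passes and then transposed with zip.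
import Mathlib
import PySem

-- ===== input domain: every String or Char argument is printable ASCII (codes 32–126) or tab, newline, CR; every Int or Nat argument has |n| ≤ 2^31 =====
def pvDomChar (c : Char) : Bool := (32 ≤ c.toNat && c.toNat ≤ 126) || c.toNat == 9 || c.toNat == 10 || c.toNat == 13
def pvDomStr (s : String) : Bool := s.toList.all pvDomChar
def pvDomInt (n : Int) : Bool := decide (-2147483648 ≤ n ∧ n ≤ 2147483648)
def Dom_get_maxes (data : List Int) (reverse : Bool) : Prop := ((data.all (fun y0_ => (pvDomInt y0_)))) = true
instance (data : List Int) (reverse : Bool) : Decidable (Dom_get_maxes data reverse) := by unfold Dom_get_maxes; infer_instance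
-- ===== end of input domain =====

-- B replaces A's row-snapshot loop (copy the last 157-row, lower one bucket, append) by a
-- column-major algorithm: 157 independent running-minimum columns, then a transpose (zip).
-- Objective 'alternative'; same asymptotic cost.

-- ===== PORT A =====
def get_maxes (data : List Int) (reverse : Bool) : List (List Int) :=
  let d := if reverse then data.reverse else data
  match d with
  | [] => []   -- Python raises IndexError reading the first element; excluded by Pre_get_maxes
  | x :: _ =>
    let maxes := PySem.List.pySetD (List.replicate 157 ((10:Int)^10)) (PySem.Int.mod x 157) x
    let res := (PySem.List.slice d (some 1) none).foldl
      (fun res i =>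
        let new := res.getLast!
        res ++ [PySem.List.pySetD new (PySem.Int.mod i 157)
                  (min (PySem.List.pyGetD new (PySem.Int.mod i 157) 0) i)])
      [maxes]
    if !reverse then res else res.reverse

-- ===== PORT B =====
-- running-minimum column for residue class b (the inner 'for x in seq' loop of Source B)
def pvColB (b : Int) (cur : Int) : List Int → List Int
  | [] => []
  | x :: xs =>
    let cur' := if PySem.Int.mod x 157 == b then min cur x else cur
    cur' :: pvColB b cur' xs

-- termination measure helpers for the transpose (cited by decreasing_by)
lemma pvSumTailLe (cols : List (List Int)) :
    ((cols.map (fun c => c.tail)).map List.length).sum ≤ (cols.map List.length).sum := by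
  induction cols with
  | nil => simp
  | cons c cs ih =>
    simp only [List.map_cons, List.sum_cons]
    have : c.tail.length ≤ c.length := by
      cases c <;> simp
    omega

lemma pvSumTailLt (cols : List (List Int)) (h1 : cols ≠ [])
    (h2 : ∀ c ∈ cols, c ≠ []) :
    ((cols.map (fun c => c.tail)).map List.length).sum < (cols.map List.length).sum := by
  cases cols with
  | nil => exact absurd rfl h1
  | cons c cs =>
    simp only [List.map_cons, List.sum_cons]
    have hc : c ≠ [] := h2 c (by simp)
    have : c.tail.length < c.length := by
      cases c with
      | nil => exact absurd rfl hc
      | cons a as => simp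
    have := pvSumTailLe cs
    omega

-- zip(*cols): emit the heads, recurse on the tails, stop when any column is exhausted
def pvTransposeB (cols : List (List Int)) : List (List Int) :=
  if h : cols ≠ [] ∧ ∀ c ∈ cols, c ≠ [] then
    cols.map (fun c => c.headD 0) :: pvTransposeB (cols.map (fun c => c.tail))
  else []
termination_by (cols.map List.length).sum
decreasing_by have := pvSumTailLt cols h.1 h.2; simpa using this

def get_maxes_alt (data : List Int) (reverse : Bool) : List (List Int) :=
  let seq := if reverse then data.reverse else data
  let cols := (PySem.List.pyRange 0 157 1).map (fun b => pvColB b ((10:Int)^10) seq)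
  let rows := pvTransposeB cols
  if reverse then rows.reverse else rows

-- ===== PRECONDITION & SPEC =====
-- A (the Python) raises IndexError reading the first element of the empty list; that is the only exclusion.
def Pre_get_maxes (data : List Int) (reverse : Bool) : Prop := data ≠ []
instance (data : List Int) (reverse : Bool) : Decidable (Pre_get_maxes data reverse) := by
  unfold Pre_get_maxes; infer_instance

def pvWitness_get_maxes : List Int × Bool := ([3, 160, -2], true)

def Spec_get_maxes (data : List Int) (reverse : Bool) (out : List (List Int)) : Prop := out = get_maxes_alt data reverse
instance (data : List Int) (reverse : Bool) (out : List (List Int)) : Decidable (Spec_get_maxes data reverse out) := by unfold Spec_get_maxes; infer_instance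

-- ===== CLAIM =====
def Claim_equal_get_maxes : Prop := ∀ (data : List Int) (reverse : Bool), Dom_get_maxes data reverse → Pre_get_maxes data reverse → Spec_get_maxes data reverse (get_maxes data reverse)

-- ===== LEMMAS AND PROOFS =====

-- the common abstraction both proofs reduce to: A's per-element row update, and the row list
def pvRowStep (row : List Int) (i : Int) : List Int :=
  PySem.List.pySetD row (PySem.Int.mod i 157)
    (min (PySem.List.pyGetD row (PySem.Int.mod i 157) 0) i)

def pvRows (row : List Int) : List Int → List (List Int)
  | [] => []
  | x :: xs => pvRowStep row x :: pvRows (pvRowStep row x) xs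

lemma pvRowStep_length (row : List Int) (i : Int) :
    (pvRowStep row i).length = row.length := by
  unfold pvRowStep; simp [PySem.List.length_pySetD]

-- A's foldl-append loop produces exactly pvRows
lemma pvFoldl_rows (l : List Int) (pre : List (List Int)) (last : List Int) :
    l.foldl
      (fun res i =>
        let new := res.getLast!
        res ++ [PySem.List.pySetD new (PySem.Int.mod i 157)
                  (min (PySem.List.pyGetD new (PySem.Int.mod i 157) 0) i)])
      (pre ++ [last])
    = pre ++ last :: pvRows last l := by
  induction l generalizing pre last with
  | nil => simp [pvRows]
  | cons i l ih =>
    simp only [List.foldl_cons]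
    have hlast : (pre ++ [last]).getLast! = last := by simp
    rw [hlast]
    have := ih (pre ++ [last]) (pvRowStep last i)
    simp only [pvRowStep] at this
    rw [List.append_assoc] at this ⊢
    rw [this]
    simp [pvRows, pvRowStep]

-- the running value for bucket b after one step is bucket b of pvRowStep row x
lemma pvCur_eq (row : List Int) (x b : Int) (hb0 : 0 ≤ b) (hb : b < 157)
    (h : row.length = 157) :
    (if PySem.Int.mod x 157 == b then min (PySem.List.pyGetD row b 0) x
     else PySem.List.pyGetD row b 0)
    = PySem.List.pyGetD (pvRowStep row x) b 0 := by
  have hj0 : 0 ≤ PySem.Int.mod x 157 := PySem.Int.mod_nonneg x (by norm_num)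
  have hjlt : PySem.Int.mod x 157 < 157 := PySem.Int.mod_lt x (by norm_num)
  obtain ⟨j, hj⟩ : ∃ j : Nat, PySem.Int.mod x 157 = (j : Int) :=
    ⟨(PySem.Int.mod x 157).toNat, by omega⟩
  have hjlen : j < row.length := by omega
  obtain ⟨n, hn⟩ : ∃ n : Nat, b = (n : Int) := ⟨b.toNat, by omega⟩
  unfold pvRowStep
  rw [hj, hn, PySem.List.pyGetD_pySetD_natCast row j n _ _ hjlen]
  by_cases hbj : n = j
  · subst hbj; simp
  · have h1 : ((j : Int) == (n : Int)) = false := by simp [Ne.symm hbj]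
    rw [h1]
    simp [hbj]

-- key lemma: transposing the columns yields the row list
lemma pvTranspose_rows (seq : List Int) (row : List Int) (h : row.length = 157) :
    pvTransposeB ((PySem.List.pyRange 0 157 1).map
        (fun b => pvColB b (PySem.List.pyGetD row b 0) seq))
    = pvRows row seq := by
  induction seq generalizing row with
  | nil =>
    rw [pvTransposeB.eq_def]
    rw [dif_neg]
    · simp [pvRows]
    · intro ⟨_, hall⟩
      have h0 : (0 : Int) ∈ PySem.List.pyRange 0 157 1 := by
        rw [PySem.List.mem_pyRange_one]; omega
      exact hall _ (List.mem_map_of_mem h0) (by simp [pvColB])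
  | cons x xs ih =>
    have hcols : ∀ b ∈ PySem.List.pyRange 0 157 1,
        pvColB b (PySem.List.pyGetD row b 0) (x :: xs)
        = PySem.List.pyGetD (pvRowStep row x) b 0
            :: pvColB b (PySem.List.pyGetD (pvRowStep row x) b 0) xs := by
      intro b hb
      rw [PySem.List.mem_pyRange_one] at hb
      simp only [pvColB]
      rw [pvCur_eq row x b hb.1 hb.2 h]
    rw [List.map_congr_left hcols]
    rw [pvTransposeB.eq_def, dif_pos]
    · have hhead : ((PySem.List.pyRange 0 157 1).map
          (fun b => PySem.List.pyGetD (pvRowStep row x) b 0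
              :: pvColB b (PySem.List.pyGetD (pvRowStep row x) b 0) xs)).map
          (fun c => c.headD 0)
          = pvRowStep row x := by
        rw [List.map_map]
        have hl : ((pvRowStep row x).length : Int) = 157 := by
          rw [pvRowStep_length, h]; simp
        calc ((PySem.List.pyRange 0 157 1).map
              ((fun c => List.headD c 0) ∘ (fun b => PySem.List.pyGetD (pvRowStep row x) b 0
                  :: pvColB b (PySem.List.pyGetD (pvRowStep row x) b 0) xs)))
            = (PySem.List.pyRange 0 ((pvRowStep row x).length : Int) 1).map
                (fun b => PySem.List.pyGetD (pvRowStep row x) b 0) := by rw [hl]; rfl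
          _ = pvRowStep row x := PySem.List.map_pyGetD_pyRange_zero' (pvRowStep row x) 0
      have htail : ((PySem.List.pyRange 0 157 1).map
          (fun b => PySem.List.pyGetD (pvRowStep row x) b 0
              :: pvColB b (PySem.List.pyGetD (pvRowStep row x) b 0) xs)).map
          (fun c => c.tail)
          = (PySem.List.pyRange 0 157 1).map
              (fun b => pvColB b (PySem.List.pyGetD (pvRowStep row x) b 0) xs) := by
        rw [List.map_map]; rfl
      rw [hhead, htail, ih (pvRowStep row x) (by rw [pvRowStep_length]; exact h)]
      simp [pvRows]
    · constructor
      · intro hnil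
        have : (PySem.List.pyRange 0 157 1).length = 157 := by
          rw [PySem.List.length_pyRange_one]; rfl
        rw [List.map_eq_nil_iff.mp hnil] at this
        simp at this
      · intro c hc
        obtain ⟨b, _, hbc⟩ := List.mem_map.mp hc
        rw [← hbc]; simp

-- ===== VERDICT =====
theorem get_maxes_spec : Claim_equal_get_maxes := by
  intro data reverse hdom hpre
  unfold Spec_get_maxes get_maxes get_maxes_alt
  have hd : (if reverse then data.reverse else data) ≠ [] := by
    cases reverse <;> simpa using hpre
  cases hseq : (if reverse then data.reverse else data) with
  | nil => exact absurd hseq hd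
  | cons x rest =>
    simp only []
    -- bound on x from Dom
    have hxd : x ∈ data := by
      have : x ∈ (if reverse then data.reverse else data) := by rw [hseq]; simp
      cases reverse <;> simpa using this
    have hxb : -2147483648 ≤ x ∧ x ≤ 2147483648 := by
      unfold Dom_get_maxes at hdom
      rw [List.all_eq_true] at hdom
      have := hdom x hxd
      simpa [pvDomInt] using this
    -- the initial row
    set row0 : List Int := List.replicate 157 ((10:Int)^10) with hrow0
    have hrow0len : row0.length = 157 := by simp [hrow0]
    -- A's side
    have hslice : PySem.List.slice (x :: rest) (some 1) none = rest := by
      simpa using PySem.List.slice_from_one (x :: rest)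
    rw [hslice]
    have hA := pvFoldl_rows rest []
      (PySem.List.pySetD row0 (PySem.Int.mod x 157) x)
    simp only [List.nil_append] at hA
    rw [hA]
    -- B's side: the columns start from pyGetD row0 b 0 = 10^10
    have hcols : (PySem.List.pyRange 0 157 1).map
        (fun b => pvColB b ((10:Int)^10) (x :: rest))
        = (PySem.List.pyRange 0 157 1).map
            (fun b => pvColB b (PySem.List.pyGetD row0 b 0) (x :: rest)) := by
      apply List.map_congr_left
      intro b hb
      rw [PySem.List.mem_pyRange_one] at hb
      obtain ⟨n, hn⟩ : ∃ n : Nat, b = (n : Int) := ⟨b.toNat, by omega⟩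
      have hnlt : n < 157 := by omega
      rw [hn, PySem.List.pyGetD_natCast, hrow0, List.getD_eq_getElem?_getD,
        List.getElem?_replicate]
      simp [hnlt]
    rw [hcols, pvTranspose_rows (x :: rest) row0 hrow0len]
    -- the first row of B equals A's maxes
    have hfirst : pvRowStep row0 x
        = PySem.List.pySetD row0 (PySem.Int.mod x 157) x := by
      unfold pvRowStep
      have hj0 : 0 ≤ PySem.Int.mod x 157 := PySem.Int.mod_nonneg x (by norm_num)
      have hjlt : PySem.Int.mod x 157 < 157 := PySem.Int.mod_lt x (by norm_num)
      obtain ⟨j, hj⟩ : ∃ j : Nat, PySem.Int.mod x 157 = (j : Int) :=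
        ⟨(PySem.Int.mod x 157).toNat, by omega⟩
      have hjlen : j < 157 := by omega
      rw [hj, PySem.List.pyGetD_natCast]
      have : row0.getD j 0 = (10:Int)^10 := by
        rw [hrow0, List.getD_eq_getElem?_getD, List.getElem?_replicate]
        simp [hjlen]
      rw [this]
      have : min ((10:Int)^10) x = x := by
        have := hxb.2; omega
      rw [this]
    simp only [pvRows, hfirst]
    cases reverse <;> rfl
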